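-- pv_equiv track=rewrite | github.com/causaly/ctgov-core-pipeline | CT_11_text_generation.py | make_mesh_string
-- ===== SOURCE A (Python) =====
-- def make_mesh_string(_article_mesh_terms):
--     terms = _article_mesh_terms.split('|')
--     mesh_headings = []
--     mesh_headings_ids = []
--     for term in terms:
--         if term == '0':
--             break
--         mesh_id, mesh = term.split('#####')
--         mesh_headings.append(mesh)
--         mesh_headings_ids.append(mesh_id)
--     mesh_major_topicyn = ['Y'] * len(mesh_headings_ids)
--
--     mesh_headings_string = f'MESH_HEADINGS : {"|".join(mesh_headings)}'
--     mesh_headings_ids_string = f'MESH_HEADINGS_IDS : {"|".join(mesh_headings_ids)}'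
--     mesh_major_topicyn_string = f'MESH_MAJOR_TOPICYN : {"|".join(mesh_major_topicyn)}'
--     mesh_qualifiers_string = f'MESH_QUALIFIERS : '
--
--     mesh_string = '\n'.join([mesh_headings_string, mesh_headings_ids_string,
--                              mesh_major_topicyn_string, mesh_qualifiers_string])
--
--     # MESH_QUALIFIERS  = []
--     return mesh_string
-- ===== SOURCE B (Python) =====
-- def make_mesh_string(_article_mesh_terms):
--     # Single pass with string accumulators: the three joined output lines are
--     # built incrementally; no intermediate lists and no join().
--     heads = ids = yn = ''
--     first = True
--     for term in _article_mesh_terms.split('|'):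
--         if term == '0':
--             break
--         mesh_id, mesh = term.split('#####')  # keeps the ValueError on malformed tokens
--         if first:
--             heads, ids, yn, first = mesh, mesh_id, 'Y', False
--         else:
--             heads += '|' + mesh
--             ids += '|' + mesh_id
--             yn += '|Y'
--     return ('MESH_HEADINGS : ' + heads + '\nMESH_HEADINGS_IDS : ' + ids
--             + '\nMESH_MAJOR_TOPICYN : ' + yn + '\nMESH_QUALIFIERS : ')
-- ===== Notes on version B (the rewrite author's own statement) =====
-- stated objective: alternative
-- what changed: Instead of accumulating two parallel lists and joining four sections at the end, B maintains the three already-joined output lines as string accumulators in a single pass (a first-element flag supplies the separators), so no intermediate lists and no join() exist.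
import Mathlib
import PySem

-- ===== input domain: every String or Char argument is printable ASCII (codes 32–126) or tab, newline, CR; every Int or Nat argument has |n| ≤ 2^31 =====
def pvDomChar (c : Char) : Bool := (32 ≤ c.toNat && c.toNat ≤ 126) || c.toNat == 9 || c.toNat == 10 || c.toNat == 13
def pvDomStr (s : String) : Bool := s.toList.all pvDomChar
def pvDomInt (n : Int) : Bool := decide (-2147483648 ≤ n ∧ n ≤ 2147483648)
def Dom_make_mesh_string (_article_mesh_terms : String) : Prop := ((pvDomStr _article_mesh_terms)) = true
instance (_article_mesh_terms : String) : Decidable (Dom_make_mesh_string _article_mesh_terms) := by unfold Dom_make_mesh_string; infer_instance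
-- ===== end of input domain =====

-- B replaces A's two-parallel-lists-then-join shape by a single pass that keeps the three
-- already-joined output lines as string accumulators (objective: alternative, same cost).

-- ===== PORT A =====
-- the for-loop with break, appending to mesh_headings / mesh_headings_ids in step
def make_mesh_string_loop : List String → List String × List String
  | [] => ([], [])
  | term :: rest =>
    if term = "0" then ([], [])
    else
      match (PySem.Str.split? term "#####").getD [] with
      | [mesh_id, mesh] =>
        let p := make_mesh_string_loop rest
        (mesh :: p.1, mesh_id :: p.2)
      | _ => ([], [])  -- Python raises ValueError here (unpack ≠ 2 parts); excluded by Pre_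

def make_mesh_string (_article_mesh_terms : String) : String :=
  let terms := (PySem.Str.split? _article_mesh_terms "|").getD []   -- '|' ≠ '', so split? is some
  let p := make_mesh_string_loop terms
  let mesh_headings := p.1
  let mesh_headings_ids := p.2
  let mesh_major_topicyn := List.replicate mesh_headings_ids.length "Y"
  let mesh_headings_string := "MESH_HEADINGS : " ++ PySem.Str.join "|" mesh_headings
  let mesh_headings_ids_string := "MESH_HEADINGS_IDS : " ++ PySem.Str.join "|" mesh_headings_ids
  let mesh_major_topicyn_string := "MESH_MAJOR_TOPICYN : " ++ PySem.Str.join "|" mesh_major_topicyn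
  let mesh_qualifiers_string := "MESH_QUALIFIERS : "
  PySem.Str.join "\n" [mesh_headings_string, mesh_headings_ids_string,
                       mesh_major_topicyn_string, mesh_qualifiers_string]

-- ===== PORT B =====
-- B's single pass: state = (heads, ids, yn, first); the break and the first-element flag
-- are as in Source B; tail recursion carries the three joined-line accumulators.
def make_mesh_string_alt_loop : List String → String × String × String × Bool → String × String × String × Bool
  | [], st => st
  | term :: rest, st =>
    if term = "0" then st
    else
      match (PySem.Str.split? term "#####").getD [] with
      | [mesh_id, mesh] =>
        make_mesh_string_alt_loop rest
          (if st.2.2.2 then (mesh, mesh_id, "Y", false)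
           else (st.1 ++ "|" ++ mesh, st.2.1 ++ "|" ++ mesh_id, st.2.2.1 ++ "|Y", false))
      | _ => st  -- Python raises ValueError here (unpack ≠ 2 parts); excluded by Pre_

def make_mesh_string_alt (_article_mesh_terms : String) : String :=
  let terms := (PySem.Str.split? _article_mesh_terms "|").getD []   -- '|' ≠ '', so split? is some
  let st := make_mesh_string_alt_loop terms ("", "", "", true)
  "MESH_HEADINGS : " ++ st.1 ++ "\nMESH_HEADINGS_IDS : " ++ st.2.1
    ++ "\nMESH_MAJOR_TOPICYN : " ++ st.2.2.1 ++ "\nMESH_QUALIFIERS : "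

-- ===== PRECONDITION & SPEC =====
-- Pre_ excludes exactly the inputs where some '|'-term before the first '0' sentinel does not
-- split on '#####' into exactly two parts: there both Pythons raise ValueError.
def Pre_make_mesh_string (_article_mesh_terms : String) : Prop :=
  ∀ t ∈ ((PySem.Str.split? _article_mesh_terms "|").getD []).takeWhile (fun t => !(t == "0")),
    ((PySem.Str.split? t "#####").getD []).length = 2
instance (_article_mesh_terms : String) : Decidable (Pre_make_mesh_string _article_mesh_terms) := by
  unfold Pre_make_mesh_string; infer_instance

def pvWitness_make_mesh_string : String := "D01#####Aspirin|D02#####Pain|0"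

def Spec_make_mesh_string (_article_mesh_terms : String) (out : String) : Prop := out = make_mesh_string_alt _article_mesh_terms
instance (_article_mesh_terms : String) (out : String) : Decidable (Spec_make_mesh_string _article_mesh_terms out) := by unfold Spec_make_mesh_string; infer_instance

-- ===== CLAIM (what is proved, stated in full; the proofs are below) =====
def Claim_equal_make_mesh_string : Prop := ∀ (_article_mesh_terms : String), Dom_make_mesh_string _article_mesh_terms → Pre_make_mesh_string _article_mesh_terms → Spec_make_mesh_string _article_mesh_terms (make_mesh_string _article_mesh_terms)

-- ===== LEMMAS AND PROOFS =====

-- "|"-prefixed concatenation: what B's non-first branch appends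
def pvPJ : List String → String
  | [] => ""
  | x :: l => "|" ++ x ++ pvPJ l

theorem str_join_cons_cons (sep x y : String) (l : List String) :
    PySem.Str.join sep (x :: y :: l) = x ++ sep ++ PySem.Str.join sep (y :: l) := by
  simp [PySem.Str.join, PySem.Chars.join_cons_cons, String.ofList_append,
    String.ofList_toList, String.append_assoc]

-- '|'.join on a cons is head ++ the "|"-prefixed concatenation of the tail
theorem join_bar_cons (x : String) (l : List String) :
    PySem.Str.join "|" (x :: l) = x ++ pvPJ l := by
  induction l generalizing x with
  | nil => simp [PySem.Str.join, PySem.Chars.join, List.intercalate, pvPJ,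
      String.ofList_toList]
  | cons y l ih =>
    rw [str_join_cons_cons, ih y]
    simp [pvPJ, String.append_assoc]

theorem bar_append_Y : ("|" ++ "Y" : String) = "|Y" := by decide

-- B's loop in the non-first state appends the "|"-prefixed fields of the remaining pairs
theorem alt_loop_false (ts : List String)
    (hpre : ∀ t ∈ ts.takeWhile (fun t => !(t == "0")),
      ((PySem.Str.split? t "#####").getD []).length = 2)
    (h i y : String) :
    make_mesh_string_alt_loop ts (h, i, y, false) =
      (h ++ pvPJ (make_mesh_string_loop ts).1,
       i ++ pvPJ (make_mesh_string_loop ts).2,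
       y ++ pvPJ (List.replicate (make_mesh_string_loop ts).2.length "Y"),
       false) := by
  induction ts generalizing h i y with
  | nil => simp [make_mesh_string_alt_loop, make_mesh_string_loop, pvPJ]
  | cons t rest ih =>
    by_cases h0 : t = "0"
    · subst h0; simp [make_mesh_string_alt_loop, make_mesh_string_loop, pvPJ]
    · have hb : (t == "0") = false := by simp [h0]
      have hmem : t ∈ (t :: rest).takeWhile (fun t => !(t == "0")) := by simp [hb]
      obtain ⟨mi, m, hsplit⟩ := List.length_eq_two.mp (hpre t hmem)
      have hrest : ∀ t' ∈ rest.takeWhile (fun t => !(t == "0")),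
          ((PySem.Str.split? t' "#####").getD []).length = 2 := by
        intro t' ht'; exact hpre t' (by simp [hb, ht'])
      simp [make_mesh_string_alt_loop, make_mesh_string_loop, h0, hsplit, ih hrest,
        pvPJ, List.replicate_succ, ← bar_append_Y, String.append_assoc]

-- B's whole loop from the initial state computes the '|'.joins of A's two lists
theorem alt_loop_true (ts : List String)
    (hpre : ∀ t ∈ ts.takeWhile (fun t => !(t == "0")),
      ((PySem.Str.split? t "#####").getD []).length = 2) :
    (make_mesh_string_alt_loop ts ("", "", "", true)).1 =
      PySem.Str.join "|" (make_mesh_string_loop ts).1 ∧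
    (make_mesh_string_alt_loop ts ("", "", "", true)).2.1 =
      PySem.Str.join "|" (make_mesh_string_loop ts).2 ∧
    (make_mesh_string_alt_loop ts ("", "", "", true)).2.2.1 =
      PySem.Str.join "|" (List.replicate (make_mesh_string_loop ts).2.length "Y") := by
  cases ts with
  | nil => exact ⟨rfl, rfl, rfl⟩
  | cons t rest =>
    by_cases h0 : t = "0"
    · subst h0
      refine ⟨?_, ?_, ?_⟩ <;>
        simp [make_mesh_string_alt_loop, make_mesh_string_loop, PySem.Str.join,
          PySem.Chars.join, List.intercalate]
    · have hb : (t == "0") = false := by simp [h0]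
      have hmem : t ∈ (t :: rest).takeWhile (fun t => !(t == "0")) := by simp [hb]
      obtain ⟨mi, m, hsplit⟩ := List.length_eq_two.mp (hpre t hmem)
      have hrest : ∀ t' ∈ rest.takeWhile (fun t => !(t == "0")),
          ((PySem.Str.split? t' "#####").getD []).length = 2 := by
        intro t' ht'; exact hpre t' (by simp [hb, ht'])
      have hstep : make_mesh_string_alt_loop (t :: rest) ("", "", "", true) =
          make_mesh_string_alt_loop rest (m, mi, "Y", false) := by
        simp [make_mesh_string_alt_loop, h0, hsplit]
      rw [hstep, alt_loop_false rest hrest]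
      refine ⟨?_, ?_, ?_⟩ <;>
        simp [make_mesh_string_loop, h0, hsplit, join_bar_cons, List.replicate_succ]

-- merging adjacent string literals under right-associated append
theorem append_lit_merge (a b c : String) (h : a ++ b = c) (x : String) :
    a ++ (b ++ x) = c ++ x := by rw [← String.append_assoc, h]

-- '\n'.join of a four-element list is the three-newline concatenation
theorem ofList_newline_cons (l : List Char) : String.ofList ('\n' :: l) = "\n" ++ String.ofList l := by
  rw [← String.ofList_append]; rfl

theorem join_four (a b c d : String) :
    PySem.Str.join "\n" [a, b, c, d] = a ++ "\n" ++ b ++ "\n" ++ c ++ "\n" ++ d := by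
  simp [PySem.Str.join, PySem.Chars.join, List.intercalate, String.ofList_append,
    String.ofList_toList, ofList_newline_cons, String.append_assoc]

-- ===== VERDICT (by name: the statement is the Claim_ definition above) =====
theorem make_mesh_string_spec : Claim_equal_make_mesh_string := by
  intro s _ hpre
  unfold Spec_make_mesh_string make_mesh_string make_mesh_string_alt
  dsimp only
  obtain ⟨h1, h2, h3⟩ := alt_loop_true ((PySem.Str.split? s "|").getD []) hpre
  rw [h1, h2, h3, join_four]
  simp [String.append_assoc,
    append_lit_merge "\n" "MESH_HEADINGS_IDS : " "\nMESH_HEADINGS_IDS : " (by decide),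
    append_lit_merge "\n" "MESH_MAJOR_TOPICYN : " "\nMESH_MAJOR_TOPICYN : " (by decide),
    show ("\n" ++ "MESH_QUALIFIERS : " : String) = "\nMESH_QUALIFIERS : " from by decide]
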